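-- pv_equiv track=rewrite | github.com/austral-prog/tp-7-LucioZampella | loops_and_print.py | enumerate_backwards
-- ===== SOURCE A (Python) =====
-- def enumerate_backwards(lista):
-- 	new_lista = []
-- 	index = 0
-- 	for string in lista:
-- 		if string:
-- 			new_lista.append(f"{index}. {string[::-1]}")
-- 			index += 1
-- 	return new_lista
-- ===== SOURCE B (Python) =====
-- def enumerate_backwards(lista):
--     # Count the truthy strings first, then walk the list BACKWARDS with a
--     # countdown index, building the output back-to-front, and reverse at the end.
--     n = 0
--     for s in lista:
--         if s:
--             n += 1
--     out = []
--     for s in reversed(lista):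
--         if s:
--             n -= 1
--             out.append(f"{n}. {s[::-1]}")
--     out.reverse()
--     return out
-- ===== Notes on version B (the rewrite author's own statement) =====
-- stated objective: alternative
-- what changed: Two-stage back-to-front construction: first a counting pass over the truthy strings, then a reverse traversal that assigns indices by counting DOWN from the total and builds the output last-to-first, finished by a final reverse - instead of A's single forward pass with an incrementing counter.
import Mathlib
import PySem

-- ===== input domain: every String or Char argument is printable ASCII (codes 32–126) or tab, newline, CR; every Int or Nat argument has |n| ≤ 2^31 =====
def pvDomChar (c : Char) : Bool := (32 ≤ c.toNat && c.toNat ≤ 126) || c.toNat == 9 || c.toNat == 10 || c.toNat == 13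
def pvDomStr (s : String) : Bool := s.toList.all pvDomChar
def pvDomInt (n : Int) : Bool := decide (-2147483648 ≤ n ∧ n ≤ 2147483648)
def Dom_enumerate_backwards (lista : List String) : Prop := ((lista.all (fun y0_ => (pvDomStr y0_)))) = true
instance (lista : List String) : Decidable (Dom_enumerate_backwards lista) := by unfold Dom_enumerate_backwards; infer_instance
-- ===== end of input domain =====

-- B builds the result back-to-front: one counting pass, then a reverse traversal with a
-- countdown index, then a final reverse (alternative decomposition; same O(n) cost).


-- f"{i}. {s[::-1]}": s[::-1] is reversal; both Pythons contain this same f-string,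
-- so both ports share this helper.
def pvLine (i : Int) (s : String) : String :=
  String.ofList (PySem.Int.toChars i ++ ('.' :: ' ' :: s.toList.reverse))

-- ===== PORT A =====
-- A's loop: accumulator (new_lista, index); an empty string is falsy, so 'if string:' is s ≠ "".
def enumerate_backwards (lista : List String) : List String :=
  (lista.foldl
    (fun (st : List String × Int) s =>
      if s ≠ "" then (st.1 ++ [pvLine st.2 s], st.2 + 1) else st)
    ([], 0)).1

-- ===== PORT B =====
-- B: counting pass, then reverse traversal with countdown index, then reverse the output.
def enumerate_backwards_alt (lista : List String) : List String :=
  let n : Int := lista.foldl (fun a s => if s ≠ "" then a + 1 else a) 0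
  let st := lista.reverse.foldl
    (fun (st : Int × List String) s =>
      if s ≠ "" then (st.1 - 1, st.2 ++ [pvLine (st.1 - 1) s]) else st)
    (n, [])
  st.2.reverse

-- ===== PRECONDITION & SPEC =====
def Spec_enumerate_backwards (lista : List String) (out : List String) : Prop := out = enumerate_backwards_alt lista
instance (lista : List String) (out : List String) : Decidable (Spec_enumerate_backwards lista out) := by unfold Spec_enumerate_backwards; infer_instance

-- ===== CLAIM =====
def Claim_equal_enumerate_backwards : Prop := ∀ (lista : List String), Dom_enumerate_backwards lista → Spec_enumerate_backwards lista (enumerate_backwards lista)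

-- ===== LEMMAS AND PROOFS =====

-- common characterisation: the formatted truthy strings enumerated from i
def pvEnumMap (l : List String) (i : Int) : List String :=
  (PySem.List.enumerate (l.filter (fun s => s ≠ "")) i).map (fun p => pvLine p.1 p.2)

theorem pvEnumMap_nil (i : Int) : pvEnumMap [] i = [] := by
  simp [pvEnumMap, PySem.List.enumerate_nil]

theorem pvEnumMap_cons (s : String) (t : List String) (i : Int) :
    pvEnumMap (s :: t) i =
      if s ≠ "" then pvLine i s :: pvEnumMap t (i + 1) else pvEnumMap t i := by
  by_cases hs : s = "" <;> simp [pvEnumMap, hs, PySem.List.enumerate_cons]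

-- A's forward loop produces pvEnumMap
theorem pv_loopA_inv (l : List String) (acc : List String) (i : Int) :
    (l.foldl
      (fun (st : List String × Int) s =>
        if s ≠ "" then (st.1 ++ [pvLine st.2 s], st.2 + 1) else st)
      (acc, i)).1
    = acc ++ pvEnumMap l i := by
  induction l generalizing acc i with
  | nil => simp [pvEnumMap_nil]
  | cons s t ih =>
    rw [List.foldl_cons, pvEnumMap_cons]
    by_cases hs : s = ""
    · rw [if_neg (by simp [hs]), ih, if_neg (by simp [hs])]
    · rw [if_pos hs, ih, if_pos hs]; simp

-- B's counting pass computes countP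
theorem pv_count (l : List String) (a : Int) :
    l.foldl (fun a s => if s ≠ "" then a + 1 else a) a
      = a + (l.countP (fun s => s ≠ "") : Int) := by
  induction l generalizing a with
  | nil => simp
  | cons s t ih =>
    by_cases hs : s = ""
    · simp only [List.foldl_cons, if_neg (not_not_intro hs)]
      rw [ih]; simp [hs]
    · simp only [List.foldl_cons, if_pos hs]
      rw [ih]; simp [hs]; ring

-- B's reverse loop with the countdown counter builds pvEnumMap reversed
theorem pv_loopB_inv (l : List String) (i : Int) (out : List String) :
    l.reverse.foldl
      (fun (st : Int × List String) s =>
        if s ≠ "" then (st.1 - 1, st.2 ++ [pvLine (st.1 - 1) s]) else st)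
      (i + (l.countP (fun s => s ≠ "") : Int), out)
    = (i, out ++ (pvEnumMap l i).reverse) := by
  induction l generalizing i out with
  | nil => simp [pvEnumMap_nil]
  | cons s t ih =>
    rw [List.reverse_cons, List.foldl_append, pvEnumMap_cons]
    by_cases hs : s = ""
    · have : i + ((s :: t).countP (fun s => s ≠ "") : Int)
          = i + (t.countP (fun s => s ≠ "") : Int) := by
        simp [hs]
      rw [this, ih]
      simp [hs]
    · have : i + ((s :: t).countP (fun s => s ≠ "") : Int)
          = (i + 1) + (t.countP (fun s => s ≠ "") : Int) := by
        simp [hs]; ring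
      rw [this, ih (i + 1)]
      simp [hs]

-- ===== VERDICT =====
theorem enumerate_backwards_spec : Claim_equal_enumerate_backwards := by
  intro lista _
  show enumerate_backwards lista = enumerate_backwards_alt lista
  unfold enumerate_backwards enumerate_backwards_alt
  rw [pv_loopA_inv lista [] 0, pv_count lista 0, List.nil_append]
  show pvEnumMap lista 0 =
    ((lista.reverse.foldl
      (fun (st : Int × List String) s =>
        if s ≠ "" then (st.1 - 1, st.2 ++ [pvLine (st.1 - 1) s]) else st)
      ((0:Int) + (lista.countP (fun s => s ≠ "") : Int), [])).2).reverse
  rw [pv_loopB_inv lista 0 []]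
  simp
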